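-- pv_equiv track=rewrite | github.com/guzenco/Tracking | main.py | delz
-- ===== SOURCE A (Python) =====
-- def delz(arr):
--     buf = []
--     for e in arr:
--         if e[1] == 0:
--             buf.append(e)
--     for e in buf:
--         arr.remove(e)
--     return arr
-- ===== SOURCE B (Python) =====
-- def delz(arr):
--     arr[:] = [e for e in arr if e[1] != 0]
--     return arr
-- ===== Notes on version B (the rewrite author's own statement) =====
-- stated objective: idiomatic
-- what changed: A collects the zero-second-field elements into a buffer and then removes each one by value with list.remove; B keeps the survivors in one list-comprehension pass and writes them back in place with slice assignment.
import Mathlib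
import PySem

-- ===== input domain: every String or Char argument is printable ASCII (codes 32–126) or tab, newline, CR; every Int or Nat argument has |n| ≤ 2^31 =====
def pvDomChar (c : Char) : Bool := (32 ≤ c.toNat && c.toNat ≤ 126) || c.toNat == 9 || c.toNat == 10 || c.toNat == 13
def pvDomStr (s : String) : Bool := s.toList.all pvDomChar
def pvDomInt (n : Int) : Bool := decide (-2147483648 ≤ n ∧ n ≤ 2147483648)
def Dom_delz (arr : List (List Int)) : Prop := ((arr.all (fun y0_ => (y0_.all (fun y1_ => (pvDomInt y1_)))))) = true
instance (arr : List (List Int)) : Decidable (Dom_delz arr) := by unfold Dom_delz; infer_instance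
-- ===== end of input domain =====

-- B replaces A's collect-then-remove-by-value two-phase loop by a single keep-pass
-- (list comprehension written back in place); equivalence proved for the RETURN value,
-- both Pythons mutate arr to that same final list.

-- ===== PORT A =====
-- first loop: buf of elements whose second field is 0; second loop: arr.remove(e) for each.
-- Python's arr.remove raises ValueError when e is absent; remove? returns none there — under
-- Pre_delz every buf element is in arr, so the .getD fallback is never taken.
def delz (arr : List (List Int)) : List (List Int) :=
  let buf := arr.foldl
    (fun b e => if PySem.List.pyGet? e 1 = some 0 then b ++ [e] else b) []
  buf.foldl (fun a e => (PySem.List.remove? a e).getD a) arr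

-- ===== PORT B =====
-- arr[:] = [e for e in arr if e[1] != 0]; return arr
def delz_alt (arr : List (List Int)) : List (List Int) :=
  arr.filter (fun e => !(decide (PySem.List.pyGet? e 1 = some 0)))

-- ===== PRECONDITION & SPEC =====
-- Pre_ excludes exactly the inputs where Python A raises IndexError (an element with
-- fewer than two fields, reached by e[1]); B raises there as well.
def Pre_delz (arr : List (List Int)) : Prop := ∀ e ∈ arr, 2 ≤ e.length
instance (arr : List (List Int)) : Decidable (Pre_delz arr) := by unfold Pre_delz; infer_instance
def pvWitness_delz : List (List Int) := [[1, 0], [2, 3], [1, 0]]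

def Spec_delz (arr : List (List Int)) (out : List (List Int)) : Prop := out = delz_alt arr
instance (arr : List (List Int)) (out : List (List Int)) : Decidable (Spec_delz arr out) := by unfold Spec_delz; infer_instance

-- ===== CLAIM (what is proved, stated in full; the proofs are below) =====
def Claim_equal_delz : Prop := ∀ (arr : List (List Int)), Dom_delz arr → Pre_delz arr → Spec_delz arr (delz arr)

-- ===== LEMMAS AND PROOFS =====

-- the zero test, as A's first loop applies it
def pz (e : List Int) : Bool := decide (PySem.List.pyGet? e 1 = some 0)

-- A's first loop builds exactly the filter of the zero test
theorem buf_eq_filter (l acc : List (List Int)) :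
    l.foldl (fun b e => if PySem.List.pyGet? e 1 = some 0 then b ++ [e] else b) acc
      = acc ++ l.filter pz := by
  induction l generalizing acc with
  | nil => simp
  | cons x xs ih =>
    simp only [List.foldl_cons, List.filter_cons, pz]
    by_cases h : PySem.List.pyGet? x 1 = some 0 <;> simp [h, ih]

-- removing elements all different from the head leaves the head in place
theorem foldl_remove_cons (buf : List (List Int)) (x : List Int)
    (hx : ∀ e ∈ buf, e ≠ x) (a : List (List Int)) :
    buf.foldl (fun a e => (PySem.List.remove? a e).getD a) (x :: a)
      = x :: buf.foldl (fun a e => (PySem.List.remove? a e).getD a) a := by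
  induction buf generalizing a with
  | nil => rfl
  | cons b bs ih =>
    have hbx : x ≠ b := fun h => (hx b (List.mem_cons_self ..)) h.symm
    have hrw := PySem.List.remove?_cons_of_ne (xs := a) (v := b) hbx
    simp only [List.foldl_cons, hrw]
    rw [← ih (fun e he => hx e (List.mem_cons_of_mem _ he))]
    cases h : PySem.List.remove? a b <;> simp

-- removing, one by one, the first occurrence of each zero element leaves the non-zero ones
theorem remove_filter (l : List (List Int)) :
    (l.filter pz).foldl (fun a e => (PySem.List.remove? a e).getD a) l
      = l.filter (fun e => !pz e) := by
  induction l with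
  | nil => rfl
  | cons x xs ih =>
    by_cases h : pz x = true
    · simp only [List.filter_cons, h, if_pos, List.foldl_cons,
        PySem.List.remove?_cons_self, Option.getD_some, Bool.not_true, ih]
      simp
    · have hx : ∀ e ∈ xs.filter pz, e ≠ x := by
        intro e he hex
        exact h (hex ▸ (List.mem_filter.mp he).2)
      simp only [List.filter_cons, h]
      simp only [Bool.false_eq_true, if_false, Bool.not_false, if_true]
      rw [foldl_remove_cons _ _ hx, ih]

-- ===== VERDICT (by name: the statement is the Claim_ definition above) =====
theorem delz_spec : Claim_equal_delz := by
  intro arr _ _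
  unfold Spec_delz delz delz_alt
  rw [buf_eq_filter, List.nil_append, remove_filter]
  simp [pz]
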